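-- pv_equiv track=rewrite | github.com/mmdoogie/adventofcode2020 | AOC-2020-20.py | transform
-- ===== SOURCE A (Python) =====
-- def transform(pts, act):
--     fliplr, flipud, rot, dx, dy = act
--     rp = set()
--
--     if rot == 2:
--         fliplr = not fliplr
--         flipud = not flipud
--         rot = 0
--
--     for p in pts:
--         x, y = p
--
--         if fliplr:
--             ax = 7 - x
--         else:
--             ax = x
--
--         if flipud:
--             ay = 7 - y
--         else:
--             ay = y
--
--         if rot == 3:
--             ax, ay = ay, 7 - ax
--         elif rot == 1:
--             ax, ay = 7 - ay, ax
--
--         rp.add((ax, ay))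
--
--     return rp
-- ===== SOURCE B (Python) =====
-- def transform(pts, act):
--     fliplr, flipud, rot, dx, dy = act
--     s = set(pts)
--     if fliplr:
--         s = {(7 - x, y) for x, y in s}
--     if flipud:
--         s = {(x, 7 - y) for x, y in s}
--     turns = rot if 0 < rot < 4 else 0
--     for _ in range(turns):
--         s = {(7 - y, x) for x, y in s}
--     return s
-- ===== Notes on version B (the rewrite author's own statement) =====
-- stated objective: alternative
-- what changed: B replaces A's single loop with nested per-point flip/rotation branches by staged whole-set passes: build the set once, then apply the fliplr pass, the flipud pass, and a quarter-turn pass repeated turns times, each as its own set comprehension over the whole set.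
import Mathlib
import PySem

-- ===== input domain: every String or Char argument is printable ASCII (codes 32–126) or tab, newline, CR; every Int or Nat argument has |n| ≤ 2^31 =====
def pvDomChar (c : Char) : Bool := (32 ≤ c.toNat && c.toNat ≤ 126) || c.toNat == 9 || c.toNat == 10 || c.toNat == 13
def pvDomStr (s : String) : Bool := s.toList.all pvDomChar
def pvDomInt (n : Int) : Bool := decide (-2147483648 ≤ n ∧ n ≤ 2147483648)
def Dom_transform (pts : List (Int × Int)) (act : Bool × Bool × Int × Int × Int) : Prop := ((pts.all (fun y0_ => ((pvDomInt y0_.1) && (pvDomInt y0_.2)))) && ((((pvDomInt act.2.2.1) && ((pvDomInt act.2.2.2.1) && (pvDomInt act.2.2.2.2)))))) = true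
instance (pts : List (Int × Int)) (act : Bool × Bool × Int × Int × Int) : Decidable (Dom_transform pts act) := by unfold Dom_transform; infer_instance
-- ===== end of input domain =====

-- B builds the set once and then applies each primitive symmetry (fliplr pass, flipud pass,
-- then a quarter-turn pass repeated `turns` times) as its own whole-set pass, instead of A's
-- single loop with nested per-point branches; objective: simpler staged decomposition, same cost.

-- ===== PORT A =====
def transform (pts : List (Int × Int)) (act : Bool × Bool × Int × Int × Int) : List (Int × Int) :=
  let fliplr0 := act.1; let flipud0 := act.2.1; let rot0 := act.2.2.1
  -- if rot == 2: toggle both flips, rot = 0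
  let fliplr := if rot0 = 2 then !fliplr0 else fliplr0
  let flipud := if rot0 = 2 then !flipud0 else flipud0
  let rot := if rot0 = 2 then 0 else rot0
  pts.foldl (fun rp p =>
    let x := p.1; let y := p.2
    let ax := if fliplr then 7 - x else x
    let ay := if flipud then 7 - y else y
    let q : Int × Int :=
      if rot = 3 then (ay, 7 - ax)
      else if rot = 1 then (7 - ay, ax)
      else (ax, ay)
    PySem.Set.add rp q) PySem.Set.empty

-- ===== PORT B =====
-- staged whole-set passes, as in Source B; `for _ in range(turns)` is ported as a foldl over
-- List.range turns.toNat (turns is 0,1,2 or 3 by construction, so the iteration count is exact)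
def transform_alt (pts : List (Int × Int)) (act : Bool × Bool × Int × Int × Int) : List (Int × Int) :=
  let fliplr := act.1; let flipud := act.2.1; let rot := act.2.2.1
  let s0 : PySem.Set (Int × Int) := PySem.Set.ofList pts
  let s1 : PySem.Set (Int × Int) :=
    if fliplr then PySem.Set.ofList (s0.map (fun p => (7 - p.1, p.2))) else s0
  let s2 : PySem.Set (Int × Int) :=
    if flipud then PySem.Set.ofList (s1.map (fun p => (p.1, 7 - p.2))) else s1
  let turns : Int := if 0 < rot ∧ rot < 4 then rot else 0
  (List.range turns.toNat).foldl
    (fun s _ => PySem.Set.ofList (s.map (fun p => (7 - p.2, p.1)))) s2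

-- ===== PRECONDITION & SPEC =====
def Spec_transform (pts : List (Int × Int)) (act : Bool × Bool × Int × Int × Int) (out : List (Int × Int)) : Prop := out = transform_alt pts act
instance (pts : List (Int × Int)) (act : Bool × Bool × Int × Int × Int) (out : List (Int × Int)) : Decidable (Spec_transform pts act out) := by unfold Spec_transform; infer_instance

-- ===== CLAIM =====
def Claim_equal_transform : Prop := ∀ (pts : List (Int × Int)) (act : Bool × Bool × Int × Int × Int), Dom_transform pts act → Spec_transform pts act (transform pts act)

-- ===== LEMMAS AND PROOFS =====

-- an injective map commutes with set dedup
theorem pv_ofList_map (f : Int × Int → Int × Int) (hinj : Function.Injective f) :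
    ∀ (l : List (Int × Int)),
      PySem.Set.ofList (l.map f) = (PySem.Set.ofList l).map f := by
  intro l
  induction l with
  | nil => rfl
  | cons a t ih =>
    simp only [List.map_cons, PySem.Set.ofList_cons, ih, PySem.Set.discard,
      List.filter_map, Function.comp_def]
    congr 2
    refine List.filter_congr (fun y _ => ?_)
    by_cases h : y = a
    · simp [h]
    · simp [h, hinj.ne h]

-- one whole-set pass over an already-deduplicated set
theorem pv_stage (f : Int × Int → Int × Int) (hinj : Function.Injective f)
    (l : List (Int × Int)) :
    PySem.Set.ofList ((PySem.Set.ofList l).map f) = PySem.Set.ofList (l.map f) := by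
  rw [pv_ofList_map f hinj l, ← pv_ofList_map f hinj, PySem.Set.ofList_ofList,
    pv_ofList_map f hinj]

theorem pv_rot_inj : Function.Injective (fun p : Int × Int => (7 - p.2, p.1)) := by
  intro a b h
  simp only [Prod.mk.injEq] at h
  exact Prod.ext (by omega) (by omega)

theorem pv_lr_inj : Function.Injective (fun p : Int × Int => (7 - p.1, p.2)) := by
  intro a b h
  simp only [Prod.mk.injEq] at h
  exact Prod.ext (by omega) (by omega)

theorem pv_ud_inj : Function.Injective (fun p : Int × Int => (p.1, 7 - p.2)) := by
  intro a b h
  simp only [Prod.mk.injEq] at h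
  exact Prod.ext (by omega) (by omega)

-- the repeated quarter-turn pass, starting from a deduplicated set
theorem pv_rot_fold (n : Nat) (l : List (Int × Int)) :
    (List.range n).foldl
      (fun s _ => PySem.Set.ofList (s.map (fun p : Int × Int => (7 - p.2, p.1))))
      (PySem.Set.ofList l)
    = PySem.Set.ofList (l.map ((fun p : Int × Int => (7 - p.2, p.1))^[n])) := by
  induction n with
  | zero => simp
  | succ k ih =>
    rw [List.range_succ, List.foldl_append, ih]
    simp only [List.foldl_cons, List.foldl_nil]
    rw [pv_stage _ pv_rot_inj, List.map_map, ← Function.iterate_succ']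

-- A's fold is the set of A's per-point images, in pts order
theorem pv_A_ofList (g : Int × Int → Int × Int) (pts : List (Int × Int)) :
    pts.foldl (fun rp p => PySem.Set.add rp (g p)) PySem.Set.empty
      = PySem.Set.ofList (pts.map g) := by
  rw [PySem.Set.ofList_eq_foldl, List.foldl_map]
  rfl

-- B in closed form: one dedup, then the composed map
theorem pv_B_closed (pts : List (Int × Int)) (fl fu : Bool) (rot dx dy : Int) :
    transform_alt pts (fl, fu, rot, dx, dy)
      = PySem.Set.ofList (pts.map
          (((fun p : Int × Int => (7 - p.2, p.1))^[(if 0 < rot ∧ rot < 4 then rot else 0).toNat])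
            ∘ (fun p => if fu then (p.1, 7 - p.2) else p)
            ∘ (fun p => if fl then (7 - p.1, p.2) else p))) := by
  have hud : Function.Injective (fun p : Int × Int => if fu then (p.1, 7 - p.2) else p) := by
    cases fu
    · simp only [Bool.false_eq_true, if_false]; exact fun a b h => h
    · simp only [if_true]; exact pv_ud_inj
  have hlr : Function.Injective (fun p : Int × Int => if fl then (7 - p.1, p.2) else p) := by
    cases fl
    · simp only [Bool.false_eq_true, if_false]; exact fun a b h => h
    · simp only [if_true]; exact pv_lr_inj
  simp only [transform_alt]
  have hs1 : (if fl then PySem.Set.ofList ((PySem.Set.ofList pts).map (fun p => (7 - p.1, p.2)))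
              else PySem.Set.ofList pts)
      = PySem.Set.ofList (pts.map (fun p => if fl then (7 - p.1, p.2) else p)) := by
    cases fl
    · simp
    · simp only [if_true]; exact pv_stage _ pv_lr_inj pts
  rw [hs1]
  have hs2 : (if fu then PySem.Set.ofList
                ((PySem.Set.ofList (pts.map (fun p => if fl then (7 - p.1, p.2) else p))).map
                  (fun p => (p.1, 7 - p.2)))
              else PySem.Set.ofList (pts.map (fun p => if fl then (7 - p.1, p.2) else p)))
      = PySem.Set.ofList ((pts.map (fun p => if fl then (7 - p.1, p.2) else p)).map
          (fun p => if fu then (p.1, 7 - p.2) else p)) := by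
    cases fu
    · simp [Function.comp_def]
    · simp only [if_true]
      rw [pv_stage _ pv_ud_inj]
  rw [hs2, pv_rot_fold, List.map_map, List.map_map, Function.comp_assoc]

theorem transform_eq_alt (pts : List (Int × Int)) (act : Bool × Bool × Int × Int × Int) :
    transform pts act = transform_alt pts act := by
  obtain ⟨fl, fu, rot, dx, dy⟩ := act
  rw [pv_B_closed]
  show pts.foldl _ PySem.Set.empty = _
  rw [pv_A_ofList]
  congr 1
  refine List.map_congr_left (fun p _ => ?_)
  simp only [Function.comp_apply]
  by_cases h2 : rot = 2
  · subst h2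
    norm_num
    cases fl <;> cases fu <;>
      simp
  · by_cases h3 : rot = 3
    · subst h3
      norm_num
      cases fl <;> cases fu <;>
        simp
    · by_cases h1 : rot = 1
      · subst h1
        norm_num
        cases fl <;> cases fu <;>
          simp
      · have ht : (if 0 < rot ∧ rot < 4 then rot else 0) = 0 := by
          split_ifs with h
          · omega
          · rfl
        rw [ht]
        simp only [h2, h3, h1, if_false, Int.toNat_zero, Function.iterate_zero, id_eq]
        cases fl <;> cases fu <;> simp

-- ===== VERDICT =====
theorem transform_spec : Claim_equal_transform := by
  intro pts act _
  exact transform_eq_alt pts act
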